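-- pv_equiv track=rewrite | github.com/TheAlgorithms/Python | maths/harshad_numbers.py | all_harshad_numbers
-- ===== SOURCE A (Python) =====
-- def int_to_base(number: int, base_of_interest: int) -> str:
--     digits = "0123456789ABCDEFGHIJKLMNOPQRSTUVWXYZ"
--     result = ""
--
--     while number > 0:
--         number, remainder = divmod(number, base_of_interest)
--         result = digits[remainder] + result
--
--     if result == "":
--         result = "0"
--
--     return result
--
-- def sum_of_digits(num: int, base_of_interest: int) -> str:
--     """
--     Calculate the sum of digit values in a positive integer
--     converted to the given 'base_of_interest'.
--     Where 'base_of_interest' ranges from 2 to 36.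
--
--     Examples:
--     >>> sum_of_digits(103, 12)
--     '13'
--     >>> sum_of_digits(1275, 4)
--     '30'
--     >>> sum_of_digits(6645, 2)
--     '1001'
--     >>> # bases beyond 36 and below 2 will error
--     >>> sum_of_digits(543, 1)
--     Traceback (most recent call last):
--         ...
--     ValueError: 'base_of_interest' must be between 36 and 2 inclusive
--     >>> sum_of_digits(543, 37)
--     Traceback (most recent call last):
--         ...
--     ValueError: 'base_of_interest' must be between 36 and 2 inclusive
--     """
--
--     if (base_of_interest > 36) or (base_of_interest < 2):
--         raise ValueError("'base_of_interest' must be between 36 and 2 inclusive")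
--
--     num_str = int_to_base(num, base_of_interest)
--     res = 0
--     for char in num_str:
--         res += int(char, base_of_interest)
--     res = int_to_base(res, base_of_interest)
--     return res
--
-- def all_harshad_numbers(num: int, base_of_interest: int) -> tuple[int, list[str]]:
--     """
--     Finds all Harshad numbers smaller than num in base 'base_of_interest'.
--     Where 'base_of_interest' ranges from 2 to 36.
--
--     Examples:
--     >>> all_harshad_numbers(15, 2)
--     (7, ['1', '10', '100', '110', '1000', '1010', '1100'])
--     >>> all_harshad_numbers(12, 34)
--     (11, ['1', '2', '3', '4', '5', '6', '7', '8', '9', 'A', 'B'])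
--     >>> all_harshad_numbers(12, 4)
--     (7, ['1', '2', '3', '10', '12', '20', '21'])
--     >>> # bases beyond 36 and below 2 will error
--     >>> all_harshad_numbers(234, 37)
--     Traceback (most recent call last):
--         ...
--     ValueError: 'base_of_interest' must be between 36 and 2 inclusive
--     >>> all_harshad_numbers(234, 1)
--     Traceback (most recent call last):
--         ...
--     ValueError: 'base_of_interest' must be between 36 and 2 inclusive
--     """
--
--     if (base_of_interest > 36) or (base_of_interest < 2):
--         raise ValueError("'base_of_interest' must be between 36 and 2 inclusive")
--
--     result = 0
--     numbers = []
--     if num >= 0: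
--         for i in range(1, num):
--             y = sum_of_digits(i, base_of_interest)
--             if i % int(y, base_of_interest) == 0:
--                 result += 1
--                 numbers.append(int_to_base(i, base_of_interest))
--
--     return result, numbers
-- ===== SOURCE B (Python) =====
-- def all_harshad_numbers(num: int, base_of_interest: int) -> tuple[int, list[str]]:
--     # Incremental: maintain the current value's digit list (LSB first) and its
--     # running digit sum, updating both by add-one-with-carry instead of
--     # re-converting every i.
--     if (base_of_interest > 36) or (base_of_interest < 2):
--         raise ValueError("'base_of_interest' must be between 36 and 2 inclusive")
--     chars = "0123456789ABCDEFGHIJKLMNOPQRSTUVWXYZ"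
--     result = 0
--     numbers = []
--     digs = []       # digits of i, least significant first
--     s = 0           # sum of digs
--     i = 1
--     while i < num:
--         # add 1 to digs with carry propagation
--         j = 0
--         while j < len(digs) and digs[j] == base_of_interest - 1:
--             digs[j] = 0
--             s -= base_of_interest - 1
--             j += 1
--         if j == len(digs):
--             digs.append(1)
--         else:
--             digs[j] += 1
--         s += 1
--         if i % s == 0:
--             result += 1
--             numbers.append(''.join(chars[d] for d in reversed(digs)))
--         i += 1
--     return result, numbers
-- ===== Notes on version B (the rewrite author's own statement) =====
-- stated objective: alternative
-- what changed: B maintains the current value's digit list and running digit sum incrementally by add-one-with-carry, instead of A's per-i full base conversion plus char-parsing string round-trips through sum_of_digits.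
import Mathlib
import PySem

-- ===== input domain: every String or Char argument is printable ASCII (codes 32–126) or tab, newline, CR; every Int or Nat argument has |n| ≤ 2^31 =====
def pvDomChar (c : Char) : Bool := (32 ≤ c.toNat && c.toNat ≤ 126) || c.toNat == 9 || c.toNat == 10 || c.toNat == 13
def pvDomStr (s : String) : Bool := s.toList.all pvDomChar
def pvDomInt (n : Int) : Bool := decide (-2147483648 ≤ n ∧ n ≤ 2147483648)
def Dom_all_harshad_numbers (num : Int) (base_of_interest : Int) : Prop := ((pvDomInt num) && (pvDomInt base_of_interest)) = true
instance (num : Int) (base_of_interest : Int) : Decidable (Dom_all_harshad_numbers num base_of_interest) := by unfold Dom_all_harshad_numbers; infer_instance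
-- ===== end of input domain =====

-- B replaces the per-i base conversion and string round-trips with an incrementally
-- maintained digit list (LSB first) and running digit sum (objective: alternative).


-- ===== PORT A =====
-- the digits table "0123456789ABCDEFGHIJKLMNOPQRSTUVWXYZ" (shared by both ports)
def pyDigits : List Char := "0123456789ABCDEFGHIJKLMNOPQRSTUVWXYZ".toList

-- digits[r] — exact for 0 ≤ r < 36, the only indices either Python reaches
def pyDigitChar (r : Int) : Char := (PySem.List.pyGet? pyDigits r).getD '?'

-- the 'while number > 0' loop of int_to_base; fuel only makes it total
def int_to_base_loop : Nat → Int → Int → List Char → List Char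
  | 0, _, _, result => result
  | fuel + 1, number, base, result =>
    if number > 0 then
      int_to_base_loop fuel (PySem.Int.floordiv number base) base
        (pyDigitChar (PySem.Int.mod number base) :: result)
    else result

-- strings carried as List Char (PySem style); wrapped with String.ofList at the end
def int_to_base (number base_of_interest : Int) : List Char :=
  let result := int_to_base_loop (number.toNat + 1) number base_of_interest []
  if result = [] then ['0'] else result

-- int(c, base) for a single digit char — exact for chars drawn from pyDigits with
-- value < base, the only chars A feeds it
def digitVal (c : Char) : Int := ((pyDigits.idxOf c : Nat) : Int)

-- int(y, base) for a digit string — exact on nonempty valid digit strings (A's only use)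
def parseBase (base : Int) (s : List Char) : Int :=
  s.foldl (fun acc c => acc * base + digitVal c) 0

def sum_of_digits (num base_of_interest : Int) : List Char :=
  let num_str := int_to_base num base_of_interest
  let res := num_str.foldl (fun acc c => acc + digitVal c) 0
  int_to_base res base_of_interest

def all_harshad_numbers (num : Int) (base_of_interest : Int) : Int × List String :=
  if base_of_interest > 36 ∨ base_of_interest < 2 then (0, [])  -- Python raises ValueError; excluded by Pre_
  else
    let init : Int × List String := (0, [])
    if num ≥ 0 then
      (PySem.List.pyRange 1 num 1).foldl (fun st i =>
        let y := sum_of_digits i base_of_interest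
        if PySem.Int.mod i (parseBase base_of_interest y) = 0 then
          (st.1 + 1, st.2 ++ [String.ofList (int_to_base i base_of_interest)])
        else st) init
    else init

-- ===== PORT B =====
-- add 1 to a LSB-first digit list, returning the new list and the digit-sum delta
def incDigits (base : Int) : List Int → List Int × Int
  | [] => ([1], 1)
  | d :: rest =>
    if d = base - 1 then
      let (rest', ds) := incDigits base rest
      (0 :: rest', ds - (base - 1))
    else ((d + 1) :: rest, 1)

-- ''.join(chars[d] for d in reversed(digs))
def bRender (digs : List Int) : String := String.ofList (digs.reverse.map pyDigitChar)

-- the 'while i < num' loop; fuel = number of iterations (num-1 when i starts at 1)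
def bLoop (base : Int) : Nat → Int → List Int → Int → Int → List String → Int × List String
  | 0, _, _, _, result, numbers => (result, numbers)
  | fuel + 1, i, digs, s, result, numbers =>
    let p := incDigits base digs
    let s' := s + p.2
    if PySem.Int.mod i s' = 0 then
      bLoop base fuel (i + 1) p.1 s' (result + 1) (numbers ++ [bRender p.1])
    else
      bLoop base fuel (i + 1) p.1 s' result numbers

def all_harshad_numbers_alt (num : Int) (base_of_interest : Int) : Int × List String :=
  if base_of_interest > 36 ∨ base_of_interest < 2 then (0, [])
  else bLoop base_of_interest (num - 1).toNat 1 [] 0 0 []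

-- ===== PRECONDITION & SPEC =====
-- Pre_ excludes exactly the bases outside [2, 36], on which A raises ValueError.
def Pre_all_harshad_numbers (num : Int) (base_of_interest : Int) : Prop :=
  2 ≤ base_of_interest ∧ base_of_interest ≤ 36
instance (num : Int) (base_of_interest : Int) : Decidable (Pre_all_harshad_numbers num base_of_interest) := by unfold Pre_all_harshad_numbers; infer_instance

def pvWitness_all_harshad_numbers : Int × Int := (15, 2)

def Spec_all_harshad_numbers (num : Int) (base_of_interest : Int) (out : Int × List String) : Prop := out = all_harshad_numbers_alt num base_of_interest
instance (num : Int) (base_of_interest : Int) (out : Int × List String) : Decidable (Spec_all_harshad_numbers num base_of_interest out) := by unfold Spec_all_harshad_numbers; infer_instance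

-- ===== CLAIM (what is proved, stated in full; the proofs are below) =====
def Claim_equal_all_harshad_numbers : Prop := ∀ (num : Int) (base_of_interest : Int), Dom_all_harshad_numbers num base_of_interest → Pre_all_harshad_numbers num base_of_interest → Spec_all_harshad_numbers num base_of_interest (all_harshad_numbers num base_of_interest)

-- ===== LEMMAS AND PROOFS =====

-- Nat-level reference objects
def dsum (b n : Nat) : Nat := (Nat.digits b n).sum
def toChars (b n : Nat) : List Char := (Nat.digits b n).reverse.map (fun d : Nat => pyDigitChar (d : Int))
def hstep (b n : Nat) : List String :=
  if n % dsum b n = 0 then [String.ofList (toChars b n)] else []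
def seg (b i k : Nat) : List String := (List.range' i k).flatMap (hstep b)

-- Nat-level successor on a LSB digit list
def succD (b : Nat) : List Nat → List Nat
  | [] => [1]
  | d :: rest => if d = b - 1 then 0 :: succD b rest else (d + 1) :: rest

theorem digits_succ (b : Nat) (hb : 2 ≤ b) :
    ∀ n : Nat, Nat.digits b (n + 1) = succD b (Nat.digits b n) := by
  intro n
  induction n using Nat.strong_induction_on with
  | _ n ih =>
    rcases Nat.eq_zero_or_pos n with h0 | hpos
    · subst h0
      rw [Nat.digits_def' (by omega : 1 < b) Nat.one_pos,
        Nat.mod_eq_of_lt (by omega), Nat.div_eq_of_lt (by omega)]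
      simp [succD]
    · have hb1 : 1 < b := by omega
      have hmlt : n % b < b := Nat.mod_lt _ (by omega)
      have hdm := Nat.div_add_mod n b
      by_cases hc : n % b = b - 1
      · have hmul : b * (n / b + 1) = b * (n / b) + b := Nat.mul_succ b (n / b)
        have hn1 : n + 1 = b * (n / b + 1) := by omega
        have hdiv : (n + 1) / b = n / b + 1 := by
          rw [hn1, Nat.mul_div_cancel_left _ (by omega : 0 < b)]
        have hmod : (n + 1) % b = 0 := by
          rw [hn1, Nat.mul_mod_right]
        rw [Nat.digits_def' hb1 hpos, Nat.digits_def' hb1 (by omega : 0 < n + 1),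
          hmod, hdiv, ih (n / b) (Nat.div_lt_self hpos hb1)]
        simp [succD, hc]
      · have hmod : (n + 1) % b = n % b + 1 := by
          rw [Nat.add_mod, Nat.mod_eq_of_lt (show 1 < b by omega),
            Nat.mod_eq_of_lt (by omega : n % b + 1 < b)]
        have hdiv : (n + 1) / b = n / b := by
          rw [Nat.succ_div, if_neg]
          · omega
          · intro hdvd
            have := Nat.mod_eq_zero_of_dvd hdvd
            omega
        rw [Nat.digits_def' hb1 hpos, Nat.digits_def' hb1 (by omega : 0 < n + 1),
          hmod, hdiv]
        simp [succD, hc]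

theorem digitVal_pyDigitChar : ∀ d : Nat, d < 36 → digitVal (pyDigitChar (d : Int)) = (d : Int) := by
  decide

theorem int_to_base_loop_eq (b : Nat) (hb : 2 ≤ b) :
    ∀ (fuel n : Nat) (acc : List Char), n ≤ fuel →
      int_to_base_loop fuel (n : Int) (b : Int) acc =
        (Nat.digits b n).reverse.map (fun d : Nat => pyDigitChar (d : Int)) ++ acc := by
  intro fuel
  induction fuel with
  | zero =>
    intro n acc h
    have : n = 0 := by omega
    subst this
    simp [int_to_base_loop]
  | succ f ih =>
    intro n acc h
    rcases Nat.eq_zero_or_pos n with h0 | hpos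
    · subst h0; simp [int_to_base_loop]
    · have hpos' : (0 : Int) < (n : Int) := by exact_mod_cast hpos
      rw [int_to_base_loop, if_pos hpos',
        PySem.Int.floordiv_natCast, PySem.Int.mod_natCast,
        ih (n / b) _ (by
          have := Nat.div_lt_self hpos (show 1 < b by omega)
          omega),
        Nat.digits_def' (show 1 < b by omega) hpos]
      simp

theorem int_to_base_eq (b : Nat) (hb : 2 ≤ b) (n : Nat) :
    int_to_base (n : Int) (b : Int) = if n = 0 then ['0'] else toChars b n := by
  rcases Nat.eq_zero_or_pos n with h0 | hpos
  · subst h0; simp [int_to_base, int_to_base_loop]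
  · rw [int_to_base, int_to_base_loop_eq b hb _ n [] (by omega)]
    have hne : Nat.digits b n ≠ [] := Nat.digits_ne_nil_iff_ne_zero.mpr (by omega)
    simp only [List.append_nil, if_neg (by omega : ¬ n = 0)]
    rw [if_neg]
    · rfl
    · simp only [toChars, ne_eq, List.map_eq_nil_iff, List.reverse_eq_nil_iff]
      exact hne

theorem charsum_eq (b : Nat) (hb36 : b ≤ 36) (l : List Nat) (hl : ∀ d ∈ l, d < b) :
    ∀ x : Int, (l.reverse.map (fun d : Nat => pyDigitChar (d : Int))).foldl (fun acc c => acc + digitVal c) x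
      = x + (l.sum : Int) := by
  induction l with
  | nil => intro x; simp
  | cons d t ih =>
    intro x
    have hd : d < 36 := lt_of_lt_of_le (hl d (by simp)) hb36
    simp only [List.reverse_cons, List.map_append, List.foldl_append, List.map_cons,
      List.map_nil, List.foldl_cons, List.foldl_nil, List.sum_cons]
    rw [ih (fun d hd => hl d (by simp [hd])), digitVal_pyDigitChar d hd]
    push_cast
    ring

theorem parse_eq (b : Nat) (hb36 : b ≤ 36) (l : List Nat) (hl : ∀ d ∈ l, d < b) :
    ∀ x : Int, (l.reverse.map (fun d : Nat => pyDigitChar (d : Int))).foldl (fun acc c => acc * (b : Int) + digitVal c) x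
      = x * (b : Int) ^ l.length + ((Nat.ofDigits b l : Nat) : Int) := by
  induction l with
  | nil => intro x; simp [Nat.ofDigits_nil]
  | cons d t ih =>
    intro x
    have hd : d < 36 := lt_of_lt_of_le (hl d (by simp)) hb36
    simp only [List.reverse_cons, List.map_append, List.foldl_append, List.map_cons,
      List.map_nil, List.foldl_cons, List.foldl_nil, List.length_cons]
    rw [ih (fun d hd => hl d (by simp [hd])), digitVal_pyDigitChar d hd]
    push_cast [Nat.ofDigits_cons]
    ring

theorem dsum_pos (b : Nat) (hb : 2 ≤ b) (n : Nat) (hn : 0 < n) : 0 < dsum b n := by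
  have hne : Nat.digits b n ≠ [] := Nat.digits_ne_nil_iff_ne_zero.mpr (by omega)
  have hlast := Nat.getLast_digit_ne_zero b (show n ≠ 0 by omega)
  have hmem : (Nat.digits b n).getLast hne ∈ Nat.digits b n := List.getLast_mem hne
  have hle : (Nat.digits b n).getLast hne ≤ (Nat.digits b n).sum :=
    List.single_le_sum (fun x _ => Nat.zero_le x) _ hmem
  unfold dsum
  omega

theorem incDigits_eq (b : Nat) (hb : 2 ≤ b) :
    ∀ l : List Nat, incDigits (b : Int) (l.map (fun d : Nat => (d : Int))) =
      ((succD b l).map (fun d : Nat => (d : Int)), ((succD b l).sum : Int) - (l.sum : Int)) := by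
  intro l
  induction l with
  | nil => simp [incDigits, succD]
  | cons d t ih =>
    by_cases hc : d = b - 1
    · have hci : (d : Int) = (b : Int) - 1 := by omega
      simp only [List.map_cons, incDigits, if_pos hci, ih, succD, if_pos hc,
        List.sum_cons, List.map_cons, Prod.mk.injEq]
      constructor
      · norm_num
      · push_cast
        omega
    · have hci : ¬ (d : Int) = (b : Int) - 1 := by omega
      simp only [List.map_cons, incDigits, if_neg hci, succD, if_neg hc,
        List.sum_cons, List.map_cons, Prod.mk.injEq]
      constructor
      · push_cast; rfl
      · push_cast; ring

theorem bLoop_eq (b : Nat) (hb : 2 ≤ b) :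
    ∀ (k m : Nat) (c : Int) (l : List String),
      bLoop (b : Int) k ((m : Int) + 1) ((Nat.digits b m).map (fun d : Nat => (d : Int))) ((dsum b m : Nat) : Int) c l
        = (c + ((seg b (m + 1) k).length : Int), l ++ seg b (m + 1) k) := by
  intro k
  induction k with
  | zero => intro m c l; simp [bLoop, seg]
  | succ k ih =>
    intro m c l
    rw [bLoop]
    simp only [incDigits_eq b hb (Nat.digits b m), ← digits_succ b hb m]
    have hsum : ((dsum b m : Nat) : Int) + (((Nat.digits b (m + 1)).sum : Nat) - ((Nat.digits b m).sum : Nat) : Int)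
        = ((dsum b (m+1) : Nat) : Int) := by
      unfold dsum; push_cast; ring
    have hmod : PySem.Int.mod ((m : Int) + 1) ((dsum b (m+1) : Nat) : Int)
        = (((m+1) % dsum b (m+1) : Nat) : Int) := by
      have : ((m : Int) + 1) = ((m + 1 : Nat) : Int) := by push_cast; ring
      rw [this, PySem.Int.mod_natCast]
    have hrender : bRender ((Nat.digits b (m+1)).map (fun d : Nat => (d : Int)))
        = String.ofList (toChars b (m+1)) := by
      simp [bRender, toChars, List.map_reverse, List.map_map, Function.comp_def]
    have hseg : seg b (m + 1) (k + 1) = hstep b (m+1) ++ seg b (m + 2) k := by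
      simp [seg, List.range'_succ]
    by_cases hdvd : (m+1) % dsum b (m+1) = 0
    · rw [if_pos (by rw [hsum, hmod, hdvd]; simp)]
      have : (m : Int) + 1 + 1 = ((m + 1 : Nat) : Int) + 1 := by push_cast; ring
      rw [hsum, this, ih (m+1) (c+1) (l ++ [bRender ((Nat.digits b (m+1)).map (fun d : Nat => (d : Int)))])]
      rw [hseg, hrender]
      simp only [hstep, if_pos hdvd, Prod.mk.injEq, show m + 1 + 1 = m + 2 from rfl,
        List.singleton_append, List.length_cons, List.append_assoc]
      constructor
      · push_cast; omega
      · simp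
    · rw [if_neg (by rw [hsum, hmod]; exact_mod_cast hdvd)]
      have : (m : Int) + 1 + 1 = ((m + 1 : Nat) : Int) + 1 := by push_cast; ring
      rw [hsum, this, ih (m+1) c l]
      rw [hseg]
      simp [hstep, hdvd, show m + 1 + 1 = m + 2 from rfl]

theorem astep_eq (b : Nat) (hb : 2 ≤ b) (hb36 : b ≤ 36) (m : Nat) (hm : 0 < m)
    (st : Int × List String) :
    (if PySem.Int.mod (m : Int) (parseBase (b : Int) (sum_of_digits (m : Int) (b : Int))) = 0 then
       (st.1 + 1, st.2 ++ [String.ofList (int_to_base (m : Int) (b : Int))])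
     else st)
    = if m % dsum b m = 0 then (st.1 + 1, st.2 ++ [String.ofList (toChars b m)]) else st := by
  have hlt : ∀ d ∈ Nat.digits b m, d < b := fun d hd => Nat.digits_lt_base (by omega) hd
  have hlt' : ∀ d ∈ Nat.digits b (dsum b m), d < b := fun d hd => Nat.digits_lt_base (by omega) hd
  have hs : dsum b m ≠ 0 := by have := dsum_pos b hb m hm; omega
  have hy : sum_of_digits (m : Int) (b : Int) = toChars b (dsum b m) := by
    show int_to_base ((int_to_base (m : Int) (b : Int)).foldl (fun acc c => acc + digitVal c) 0) (b : Int) = _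
    rw [int_to_base_eq b hb m, if_neg (by omega : ¬ m = 0)]
    rw [show toChars b m = (Nat.digits b m).reverse.map (fun d : Nat => pyDigitChar (d : Int)) from rfl]
    rw [charsum_eq b hb36 (Nat.digits b m) hlt 0]
    rw [show ((0 : Int) + ((Nat.digits b m).sum : Int)) = ((dsum b m : Nat) : Int) by unfold dsum; ring]
    rw [int_to_base_eq b hb (dsum b m), if_neg hs]
  have hparse : parseBase (b : Int) (toChars b (dsum b m)) = ((dsum b m : Nat) : Int) := by
    unfold parseBase toChars
    rw [parse_eq b hb36 (Nat.digits b (dsum b m)) hlt' 0, Nat.ofDigits_digits]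
    push_cast
    ring
  have hmod : PySem.Int.mod (m : Int) ((dsum b m : Nat) : Int) = ((m % dsum b m : Nat) : Int) :=
    PySem.Int.mod_natCast m (dsum b m)
  simp only [hy, hparse, hmod]
  rw [int_to_base_eq b hb m, if_neg (by omega : ¬ m = 0)]
  by_cases hdvd : m % dsum b m = 0
  · rw [if_pos (by rw [hdvd]; simp), if_pos hdvd]
  · rw [if_neg (by exact_mod_cast hdvd), if_neg hdvd]

theorem afold_eq (b : Nat) (hb : 2 ≤ b) (hb36 : b ≤ 36) :
    ∀ (xs : List Nat) (c : Int) (l : List String), (∀ x ∈ xs, 0 < x) →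
      xs.foldl (fun st x =>
        if x % dsum b x = 0 then (st.1 + 1, st.2 ++ [String.ofList (toChars b x)]) else st) (c, l)
      = (c + ((xs.flatMap (hstep b)).length : Int), l ++ xs.flatMap (hstep b)) := by
  intro xs
  induction xs with
  | nil => intro c l _; simp
  | cons x t ih =>
    intro c l hx
    simp only [List.foldl_cons, List.flatMap_cons]
    by_cases hdvd : x % dsum b x = 0
    · rw [if_pos hdvd, ih (c+1) (l ++ [String.ofList (toChars b x)]) (fun y hy => hx y (by simp [hy]))]
      simp only [hstep, if_pos hdvd, List.singleton_append, List.length_cons,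
        Prod.mk.injEq, List.append_assoc]
      constructor
      · push_cast; omega
      · simp
    · rw [if_neg hdvd, ih c l (fun y hy => hx y (by simp [hy]))]
      simp only [hstep, if_neg hdvd, List.nil_append, and_self]

-- ===== VERDICT (by name: the statement is the Claim_ definition above) =====
theorem all_harshad_numbers_spec : Claim_equal_all_harshad_numbers := by
  intro num base hdom hpre
  obtain ⟨h2, h36⟩ := hpre
  unfold Spec_all_harshad_numbers
  obtain ⟨b, rfl⟩ : ∃ b : Nat, base = (b : Int) := ⟨base.toNat, by omega⟩
  have hb : 2 ≤ b := by omega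
  have hb36 : b ≤ 36 := by omega
  have hguard : ¬ ((b : Int) > 36 ∨ (b : Int) < 2) := by push_neg; constructor <;> omega
  rw [all_harshad_numbers, all_harshad_numbers_alt, if_neg hguard, if_neg hguard]
  set K := (num - 1).toNat with hK
  -- B side
  have hB : bLoop (b : Int) K 1 [] 0 0 [] = (((seg b 1 K).length : Int), seg b 1 K) := by
    have h0 : ([] : List Int) = (Nat.digits b 0).map (fun d : Nat => (d : Int)) := by simp
    have h1 : (1 : Int) = ((0 : Nat) : Int) + 1 := by norm_num
    have h2' : (0 : Int) = ((dsum b 0 : Nat) : Int) := by simp [dsum]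
    rw [h1]
    rw [show bLoop (b : Int) K (((0 : Nat) : Int) + 1) [] 0 0 []
        = bLoop (b : Int) K (((0 : Nat) : Int) + 1) ((Nat.digits b 0).map (fun d : Nat => (d : Int))) ((dsum b 0 : Nat) : Int) 0 [] by
      rw [← h0, ← h2']]
    rw [bLoop_eq b hb K 0 0 []]
    simp
  rw [hB]
  -- A side
  by_cases hnum : num ≥ 0
  · rw [if_pos hnum]
    have hrange : PySem.List.pyRange 1 num 1 = (List.range' 1 K).map (fun x : Nat => (x : Int)) := by
      rw [PySem.List.pyRange_one, List.range'_eq_map_range, List.map_map]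
      apply List.map_congr_left
      intro x _
      simp only [Function.comp_apply]
      push_cast
      ring
    rw [hrange, List.foldl_map]
    have hcongr : (List.range' 1 K).foldl (fun st (x : Nat) =>
          let y := sum_of_digits (x : Int) (b : Int)
          if PySem.Int.mod (x : Int) (parseBase (b : Int) y) = 0 then
            (st.1 + 1, st.2 ++ [String.ofList (int_to_base (x : Int) (b : Int))])
          else st) ((0 : Int), ([] : List String))
        = (List.range' 1 K).foldl (fun st x =>
          if x % dsum b x = 0 then (st.1 + 1, st.2 ++ [String.ofList (toChars b x)]) else st) ((0 : Int), ([] : List String)) := by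
      apply PySem.List.foldl_congr_mem
      intro st x hx
      have hx1 : 0 < x := by
        have := (List.mem_range'_1.mp hx).1
        omega
      exact astep_eq b hb hb36 x hx1 st
    rw [hcongr, afold_eq b hb hb36 (List.range' 1 K) 0 [] (fun x hx => by
      have := (List.mem_range'_1.mp hx).1; omega)]
    simp [seg]
  · rw [if_neg hnum]
    have : K = 0 := by omega
    rw [this]
    simp [seg]
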